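-- pv_equiv track=rewrite | github.com/mgopi1990/George3Hacker | word_list.py | word_with_only_letters
-- ===== SOURCE A (Python) =====
-- def word_with_only_letters(word_list, letter_list):
-- 	match_word = ''
-- 	match_word_len = 0
-- 	for word in word_list:
-- 		for letter in word:
-- 			if letter not in letter_list:
-- 				break
-- 		else:
-- 			length = len(word)
-- 			if (length > match_word_len):
-- 				match_word = word
-- 				match_word_len = length
--
-- 	return match_word
-- ===== SOURCE B (Python) =====
-- def word_with_only_letters(word_list, letter_list):
--     allowed = set(letter_list)
--     for word in sorted(word_list, key=len, reverse=True):
--         if set(word) <= allowed: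
--             return word
--     return ''
-- ===== Notes on version B (the rewrite author's own statement) =====
-- stated objective: alternative
-- what changed: Replaces A's single-pass argmax loop (tracking match_word/match_word_len with an inner for/else letter check) by sort-then-scan: stable-sort the words by length descending, then return the first word whose character set is a subset of the allowed set (default '').
import Mathlib
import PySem

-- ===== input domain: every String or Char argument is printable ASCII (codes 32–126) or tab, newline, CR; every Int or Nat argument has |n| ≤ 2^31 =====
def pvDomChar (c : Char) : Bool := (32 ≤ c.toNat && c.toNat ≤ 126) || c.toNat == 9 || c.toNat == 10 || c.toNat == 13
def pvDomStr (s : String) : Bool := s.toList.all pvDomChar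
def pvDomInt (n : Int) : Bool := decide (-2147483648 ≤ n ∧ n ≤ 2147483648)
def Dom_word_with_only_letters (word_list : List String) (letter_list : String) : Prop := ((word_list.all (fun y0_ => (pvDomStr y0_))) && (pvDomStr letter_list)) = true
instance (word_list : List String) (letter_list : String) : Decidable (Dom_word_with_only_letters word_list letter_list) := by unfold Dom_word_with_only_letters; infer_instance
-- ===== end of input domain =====

-- B replaces A's one-pass argmax loop by sort-then-scan: stable-sort the words by length
-- descending, then return the first word whose character set is contained in the allowed set.
-- ===== PORT A =====
-- inner for/else: true iff every char of cs is in letter_list (breaks at the first miss)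
def pvAllInA (cs : List Char) (letter_list : String) : Bool :=
  match cs with
  | [] => true
  | c :: rest => if c ∈ letter_list.toList then pvAllInA rest letter_list else false

def word_with_only_letters (word_list : List String) (letter_list : String) : String :=
  (word_list.foldl (fun (st : String × Nat) word =>
      if pvAllInA word.toList letter_list then
        let length := word.length
        if length > st.2 then (word, length) else st
      else st) ("", 0)).1

-- ===== PORT B =====
-- allowed = set(letter_list); for word in sorted(word_list, key=len, reverse=True):
--   if set(word) <= allowed: return word;  return ''
def word_with_only_letters_alt (word_list : List String) (letter_list : String) : String :=
  let allowed : PySem.Set Char := PySem.Set.ofList letter_list.toList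
  ((PySem.List.sorted word_list (fun w => (w.length : Int)) true).find?
      (fun w => PySem.Set.issubset (PySem.Set.ofList w.toList) allowed)).getD ""

-- ===== PRECONDITION & SPEC =====
def Spec_word_with_only_letters (word_list : List String) (letter_list : String) (out : String) : Prop := out = word_with_only_letters_alt word_list letter_list
instance (word_list : List String) (letter_list : String) (out : String) : Decidable (Spec_word_with_only_letters word_list letter_list out) := by unfold Spec_word_with_only_letters; infer_instance

-- ===== CLAIM (what is proved, stated in full; the proofs are below) =====
def Claim_equal_word_with_only_letters : Prop := ∀ (word_list : List String) (letter_list : String), Dom_word_with_only_letters word_list letter_list → Spec_word_with_only_letters word_list letter_list (word_with_only_letters word_list letter_list)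

-- ===== LEMMAS AND PROOFS =====

-- the "best so far" step of a first-maximum-by-length reduction (proof-side reference)
def pvMaxStep (acc : Option String) (w : String) : Option String :=
  match acc with
  | none => some w
  | some b => if w.length > b.length then some w else some b

-- the insertion predicate of sorted(key=len, reverse=True)
def pvBef (a b : String) : Bool := decide (((b.length : Int)) < ((a.length : Int)))

lemma pvAllInA_eq_all (cs : List Char) (ll : String) :
    pvAllInA cs ll = cs.all (fun c => c ∈ ll.toList) := by
  induction cs with
  | nil => rfl
  | cons c rest ih =>
    simp only [pvAllInA, List.all_cons, ih]
    split_ifs <;> simp_all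

-- A's foldl equals the first-maximum reduction over the filtered candidate list
lemma a_key_lemma (wl : List String) (ll : String) (mw : String) (acc : Option String)
    (h : acc.getD "" = mw) :
    (wl.foldl (fun (st : String × Nat) word =>
      if word.toList.all (fun c => c ∈ ll.toList) then
        if word.length > st.2 then (word, word.length) else st
      else st) (mw, mw.length)).1
    = ((wl.filter (fun w => w.toList.all (fun c => c ∈ ll.toList))).foldl
        pvMaxStep acc).getD "" := by
  induction wl generalizing mw acc with
  | nil => simpa using h.symm
  | cons w rest ih =>
    simp only [List.foldl_cons, List.filter_cons]
    by_cases hp : (w.toList.all (fun c => c ∈ ll.toList)) = true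
    · rw [if_pos hp, if_pos hp, List.foldl_cons]
      cases acc with
      | none =>
        have hmw : mw = "" := by simpa using h.symm
        subst hmw
        rw [show pvMaxStep none w = some w from rfl]
        by_cases hw : w.length > String.length ""
        · rw [if_pos hw]
          exact ih w (some w) rfl
        · rw [if_neg hw]
          have h0 : String.length "" = 0 := rfl
          have hwe : w = "" := String.length_eq_zero_iff.mp (by omega)
          rw [hwe]
          exact ih "" (some "") rfl
      | some b =>
        have hb : b = mw := by simpa using h
        subst hb
        rw [show pvMaxStep (some b) w = if w.length > b.length then some w else some b from rfl]
        by_cases hw : w.length > b.length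
        · rw [if_pos hw, if_pos hw]
          exact ih w (some w) rfl
        · rw [if_neg hw, if_neg hw]
          exact ih b (some b) rfl
    · rw [if_neg hp, if_neg hp]
      exact ih mw acc h

-- insertBy with pvBef preserves "length-descending"
lemma pairwise_insertBy (w : String) (L : List String)
    (h : L.Pairwise (fun a b => b.length ≤ a.length)) :
    (PySem.List.insertBy pvBef w L).Pairwise (fun a b => b.length ≤ a.length) := by
  induction L with
  | nil => simp [PySem.List.insertBy]
  | cons y ys ih =>
    rw [List.pairwise_cons] at h
    obtain ⟨hy, hys⟩ := h
    by_cases hb : pvBef w y = true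
    · have hlt : y.length < w.length := by
        simpa [pvBef] using hb
      rw [show PySem.List.insertBy pvBef w (y :: ys) = w :: y :: ys from by
        simp [PySem.List.insertBy, hb]]
      refine List.pairwise_cons.mpr ⟨?_, List.pairwise_cons.mpr ⟨hy, hys⟩⟩
      intro z hz
      rcases List.mem_cons.mp hz with rfl | hz
      · omega
      · have := hy z hz; omega
    · have hle : w.length ≤ y.length := by
        simp only [pvBef, decide_eq_true_eq] at hb
        omega
      rw [show PySem.List.insertBy pvBef w (y :: ys) = y :: PySem.List.insertBy pvBef w ys from by
        simp [PySem.List.insertBy, hb]]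
      refine List.pairwise_cons.mpr ⟨?_, ih hys⟩
      intro z hz
      rcases (PySem.List.mem_insertBy pvBef w z ys).mp hz with rfl | hz
      · exact hle
      · exact hy z hz

-- find? through a single stable insertion: the first hit of the enlarged list
-- is the first-maximum combination of the old first hit with the new word
lemma find?_insertBy (P : String → Bool) (w : String) (L : List String)
    (h : L.Pairwise (fun a b => b.length ≤ a.length)) :
    (PySem.List.insertBy pvBef w L).find? P
      = if P w then pvMaxStep (L.find? P) w else L.find? P := by
  induction L with
  | nil =>
    by_cases hp : P w = true <;>
      simp [PySem.List.insertBy, List.find?, hp, pvMaxStep]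
  | cons y ys ih =>
    rw [List.pairwise_cons] at h
    obtain ⟨hy, hys⟩ := h
    by_cases hb : pvBef w y = true
    · have hlt : y.length < w.length := by simpa [pvBef] using hb
      rw [show PySem.List.insertBy pvBef w (y :: ys) = w :: y :: ys from by
        simp [PySem.List.insertBy, hb]]
      by_cases hp : P w = true
      · rw [List.find?_cons_of_pos hp, if_pos hp]
        cases hf : (y :: ys).find? P with
        | none => simp [pvMaxStep]
        | some b =>
          have hbmem : b ∈ y :: ys := List.mem_of_find?_eq_some hf
          have hble : b.length ≤ y.length := by
            rcases List.mem_cons.mp hbmem with rfl | hmem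
            · exact le_refl _
            · exact hy b hmem
          simp [pvMaxStep]
          omega
      · rw [List.find?_cons_of_neg (by simpa using hp), if_neg (by simpa using hp)]
    · have hle : w.length ≤ y.length := by
        simp only [pvBef, decide_eq_true_eq] at hb
        omega
      rw [show PySem.List.insertBy pvBef w (y :: ys) = y :: PySem.List.insertBy pvBef w ys from by
        simp [PySem.List.insertBy, hb]]
      by_cases hq : P y = true
      · rw [List.find?_cons_of_pos hq, List.find?_cons_of_pos hq]
        by_cases hp : P w = true
        · rw [if_pos hp]
          simp [pvMaxStep]
          omega
        · rw [if_neg (by simpa using hp)]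
      · rw [List.find?_cons_of_neg (by simpa using hq), List.find?_cons_of_neg (by simpa using hq),
          ih hys]

-- find? through the whole insertion-sort fold = the guarded first-maximum fold
lemma find?_foldl_insertBy (P : String → Bool) (ws : List String) (L : List String)
    (h : L.Pairwise (fun a b => b.length ≤ a.length)) :
    ((ws.foldl (fun acc x => PySem.List.insertBy pvBef x acc) L).find? P)
      = ws.foldl (fun acc w => if P w then pvMaxStep acc w else acc) (L.find? P) := by
  induction ws generalizing L with
  | nil => rfl
  | cons w rest ih =>
    simp only [List.foldl_cons]
    rw [ih _ (pairwise_insertBy w L h), find?_insertBy P w L h]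

-- the issubset test of B is the all-chars-allowed test
lemma subset_eq_all (w ll : String) :
    PySem.Set.issubset (PySem.Set.ofList w.toList) (PySem.Set.ofList ll.toList)
      = w.toList.all (fun c => c ∈ ll.toList) := by
  by_cases h : (w.toList.all (fun c => c ∈ ll.toList)) = true
  · rw [h]
    rw [PySem.Set.issubset_iff]
    intro x hx
    have hx' : x ∈ w.toList := (PySem.Set.mem_ofList _ _).mp hx
    have := List.all_eq_true.mp h x hx'
    exact (PySem.Set.mem_ofList _ _).mpr (by simpa using this)
  · have h' := h
    rw [Bool.not_eq_true] at h'
    rw [h']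
    rw [Bool.eq_false_iff]
    intro hc
    apply h
    rw [PySem.Set.issubset_iff] at hc
    rw [List.all_eq_true]
    intro x hx
    have := hc x ((PySem.Set.mem_ofList _ _).mpr hx)
    simpa using (PySem.Set.mem_ofList _ _).mp this

-- ===== VERDICT (by name: the statement is the Claim_ definition above) =====
theorem word_with_only_letters_spec : Claim_equal_word_with_only_letters := by
  intro wl ll _
  unfold Spec_word_with_only_letters word_with_only_letters word_with_only_letters_alt
  simp only [pvAllInA_eq_all]
  have hB : (fun (w : String) => PySem.Set.issubset (PySem.Set.ofList w.toList)
        (PySem.Set.ofList ll.toList))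
      = fun (w : String) => w.toList.all (fun c => c ∈ ll.toList) :=
    funext fun w => subset_eq_all w ll
  rw [hB]
  rw [PySem.List.sorted_rev_eq_foldl_insertBy wl (fun w => (w.length : Int))]
  rw [show (fun (acc : List String) (x : String) =>
        PySem.List.insertBy (fun a b => decide (((b.length : Int)) < ((a.length : Int)))) x acc)
      = fun acc x => PySem.List.insertBy pvBef x acc from rfl]
  rw [find?_foldl_insertBy _ wl [] (by simp)]
  rw [show (("", 0) : String × Nat) = ("", String.length "") from rfl]
  rw [a_key_lemma wl ll "" none rfl]
  simp [List.foldl_filter]
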